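-- pv_equiv track=rewrite | github.com/jeffreyyun/CompetitiveProgrammingProblems | CtCI/8.13_StackBoxes.py | findStack_helper
-- ===== SOURCE A (Python) =====
-- def findStack_helper(box, boxes, myStack):
--     if myStack[box] != -1:
--         return myStack[box]
--     w1, h1, d1 = boxes[box]
--     myStack[box] = h1
--
--     for b in range(len(boxes)):
--         w2, h2, d2 = boxes[b]
--         if d2 > d1 and w2 > w1 and h2 > h1:     # it's a valid box!
--             myStack[box] = max(myStack[box], findStack_helper(b, boxes, myStack) + h1)
--
--     return myStack[box]
-- ===== SOURCE B (Python) =====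
-- def findStack_helper(box, boxes, myStack):
--     # Bottom-up DP over boxes sorted by depth descending (no recursion).
--     # Note: unlike the original, this does not mutate myStack; the return value is identical.
--     n = len(boxes)
--     order = sorted(range(n), key=lambda i: boxes[i][2], reverse=True)
--     dp = [0] * n
--     for i in order:
--         if myStack[i] != -1:
--             dp[i] = myStack[i]
--         else:
--             w1, h1, d1 = boxes[i]
--             best = 0
--             for j in range(n):
--                 w2, h2, d2 = boxes[j]
--                 if d2 > d1 and w2 > w1 and h2 > h1:
--                     best = max(best, dp[j])
--             dp[i] = h1 + best
--     return dp[box]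
-- ===== Notes on version B (the rewrite author's own statement) =====
-- stated objective: alternative
-- what changed: Replaces the mutating memoized recursion with an iterative bottom-up dynamic program: indices are sorted by depth descending so every strict dominator is already solved when a box is processed; myStack is read only as the pre-seeded memo and is not mutated (return value is identical).
-- outside the precondition, e.g. on findStack_helper(-1, [(1, 2, 3)], [5, -1]): A returns 2, B returns 5; on findStack_helper(0, [(1, 2, 3), (2, 3, 4)], [5]): A returns 5, B raises IndexError
import Mathlib
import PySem

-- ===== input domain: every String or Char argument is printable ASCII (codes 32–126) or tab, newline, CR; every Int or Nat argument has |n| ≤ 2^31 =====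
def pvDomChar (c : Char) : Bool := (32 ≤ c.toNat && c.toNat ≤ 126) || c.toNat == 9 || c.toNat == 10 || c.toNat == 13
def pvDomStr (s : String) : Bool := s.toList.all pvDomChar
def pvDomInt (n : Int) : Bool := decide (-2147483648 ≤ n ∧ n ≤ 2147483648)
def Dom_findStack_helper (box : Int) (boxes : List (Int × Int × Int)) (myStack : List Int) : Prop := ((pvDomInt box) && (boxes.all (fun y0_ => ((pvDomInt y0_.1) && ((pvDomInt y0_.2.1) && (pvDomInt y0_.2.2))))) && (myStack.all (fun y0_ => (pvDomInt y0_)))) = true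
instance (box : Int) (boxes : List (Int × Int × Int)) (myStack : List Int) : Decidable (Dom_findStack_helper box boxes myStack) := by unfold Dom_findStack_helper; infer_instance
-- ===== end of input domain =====

-- B replaces the mutating memoized recursion by an iterative bottom-up DP over the
-- indices sorted by depth descending; equivalence is about the RETURN value only
-- (A mutates myStack in place, B does not).

-- ===== PORT A =====
-- Fuel-based transliteration of the memoized recursion; the depth strictly increases
-- along recursive calls, so the fuel boxes.length + 1 is never exhausted.
def findAuxA (fuel : Nat) (box : Int) (boxes : List (Int × Int × Int)) (st : List Int) :
    Int × List Int :=
  match fuel with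
  | 0 => (0, st)
  | fuel + 1 =>
    let m := PySem.List.pyGetD st box 0
    if m ≠ -1 then (m, st)
    else
      let t := PySem.List.pyGetD boxes box (0, 0, 0)
      let st1 := PySem.List.pySetD st box t.2.1
      let st2 := (PySem.List.pyRange 0 boxes.length 1).foldl (fun s b =>
        let u := PySem.List.pyGetD boxes b (0, 0, 0)
        if u.2.2 > t.2.2 ∧ u.1 > t.1 ∧ u.2.1 > t.2.1 then
          let cur := PySem.List.pyGetD s box 0
          let r := findAuxA fuel b boxes s
          PySem.List.pySetD r.2 box (max cur (r.1 + t.2.1))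
        else s) st1
      (PySem.List.pyGetD st2 box 0, st2)

def findStack_helper (box : Int) (boxes : List (Int × Int × Int)) (myStack : List Int) : Int :=
  (findAuxA (boxes.length + 1) box boxes myStack).1

-- ===== PORT B =====
def findStack_helper_alt (box : Int) (boxes : List (Int × Int × Int)) (myStack : List Int) : Int :=
  let n := boxes.length
  let order := PySem.List.sorted (PySem.List.pyRange 0 n 1)
      (fun i => (PySem.List.pyGetD boxes i (0, 0, 0)).2.2) true
  let dp := order.foldl (fun dp i =>
    if PySem.List.pyGetD myStack i 0 ≠ -1 then
      PySem.List.pySetD dp i (PySem.List.pyGetD myStack i 0)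
    else
      let t := PySem.List.pyGetD boxes i (0, 0, 0)
      let best := (PySem.List.pyRange 0 n 1).foldl (fun best j =>
        let u := PySem.List.pyGetD boxes j (0, 0, 0)
        if u.2.2 > t.2.2 ∧ u.1 > t.1 ∧ u.2.1 > t.2.1 then
          max best (PySem.List.pyGetD dp j 0)
        else best) 0
      PySem.List.pySetD dp i (t.2.1 + best)) (List.replicate n 0)
  PySem.List.pyGetD dp box 0

-- ===== PRECONDITION & SPEC =====
-- Pre_ excludes a myStack shorter than boxes (a mismatched parallel array: B reads
-- every memo slot once and raises IndexError where A may still return), a negative box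
-- together with a myStack longer than boxes (A wraps box by len(myStack) and B by
-- len(boxes), so the two read different slots), and an out-of-range box (A raises
-- IndexError there).
def Pre_findStack_helper (box : Int) (boxes : List (Int × Int × Int)) (myStack : List Int) : Prop :=
  boxes.length ≤ myStack.length ∧
    ((0 ≤ box ∧ box < boxes.length) ∨
      (myStack.length = boxes.length ∧ -(boxes.length : Int) ≤ box ∧ box < 0))
instance (box : Int) (boxes : List (Int × Int × Int)) (myStack : List Int) : Decidable (Pre_findStack_helper box boxes myStack) := by unfold Pre_findStack_helper; infer_instance

def pvWitness_findStack_helper : Int × (List (Int × Int × Int)) × List Int :=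
  (0, [(1, 2, 3), (2, 3, 4)], [-1, -1])

def Spec_findStack_helper (box : Int) (boxes : List (Int × Int × Int)) (myStack : List Int) (out : Int) : Prop := out = findStack_helper_alt box boxes myStack
instance (box : Int) (boxes : List (Int × Int × Int)) (myStack : List Int) (out : Int) : Decidable (Spec_findStack_helper box boxes myStack out) := by unfold Spec_findStack_helper; infer_instance

-- ===== CLAIM (what is proved, stated in full; the proofs are below) =====
def Claim_equal_findStack_helper : Prop := ∀ (box : Int) (boxes : List (Int × Int × Int)) (myStack : List Int), Dom_findStack_helper box boxes myStack → Pre_findStack_helper box boxes myStack → Spec_findStack_helper box boxes myStack (findStack_helper box boxes myStack)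

-- ===== LEMMAS AND PROOFS =====
def pvN (len : Nat) (ix : Int) : Nat := (if ix < 0 then ix + len else ix).toNat

theorem pvIdx_pvN (len : Nat) (ix : Int) (h1 : -(len : Int) ≤ ix) (h2 : ix < len) :
    PySem.List.pyIdx? len ix = some (pvN len ix) := by
  unfold PySem.List.pyIdx? pvN
  split_ifs with ha hb hc <;> simp <;> omega

theorem pvN_lt (len : Nat) (ix : Int) (h1 : -(len : Int) ≤ ix) (h2 : ix < len) :
    pvN len ix < len := by unfold pvN; split_ifs <;> omega

theorem pyGetD_pvN {α : Type} (xs : List α) (ix : Int) (d : α)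
    (h1 : -(xs.length : Int) ≤ ix) (h2 : ix < xs.length) :
    PySem.List.pyGetD xs ix d = xs.getD (pvN xs.length ix) d := by
  simp [PySem.List.pyGetD, PySem.List.pyGet?, pvIdx_pvN _ _ h1 h2, List.getD]

theorem pySetD_pvN {α : Type} (xs : List α) (ix : Int) (v : α)
    (h1 : -(xs.length : Int) ≤ ix) (h2 : ix < xs.length) :
    PySem.List.pySetD xs ix v = xs.set (pvN xs.length ix) v := by
  simp [PySem.List.pySetD, PySem.List.pySet?, pvIdx_pvN _ _ h1 h2]

def pvD (boxes : List (Int × Int × Int)) (i : Nat) : Int := (boxes.getD i (0, 0, 0)).2.2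

def pvMu (boxes : List (Int × Int × Int)) (i : Nat) : Nat :=
  boxes.countP (fun t => pvD boxes i < t.2.2)

def pvPure (boxes : List (Int × Int × Int)) (myStack : List Int) : Nat → Nat → Int
  | 0, _ => 0
  | f + 1, i =>
    let m := myStack.getD i 0
    if m ≠ -1 then m
    else
      let t := boxes.getD i (0, 0, 0)
      t.2.1 + (List.range boxes.length).foldl (fun best j =>
        let u := boxes.getD j (0, 0, 0)
        if u.2.2 > t.2.2 ∧ u.1 > t.1 ∧ u.2.1 > t.2.1 then
          max best (pvPure boxes myStack f j)
        else best) 0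

def pvVal (boxes : List (Int × Int × Int)) (myStack : List Int) (i : Nat) : Int :=
  pvPure boxes myStack (pvMu boxes i + 1) i

theorem pvCountP_lt {α : Type} (p q : α → Bool) (l : List α)
    (h : ∀ x ∈ l, p x = true → q x = true) (x : α) (hx : x ∈ l)
    (hq : q x = true) (hp : p x = false) : l.countP p < l.countP q := by
  induction l with
  | nil => cases hx
  | cons a t ih =>
    rw [List.countP_cons, List.countP_cons]
    cases hx with
    | head =>
      have hle : t.countP p ≤ t.countP q := List.countP_mono_left (fun y hy => h y (.tail _ hy))
      simp [hp, hq]; omega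
    | tail _ hx =>
      have := ih (fun y hy hp' => h y (.tail _ hy) hp') hx
      have hpq : (if p a = true then 1 else 0) ≤ (if q a = true then 1 else 0) := by
        by_cases hpa : p a = true
        · simp [hpa, h a (.head _) hpa]
        · simp [hpa]
      omega

theorem pvMu_lt (boxes : List (Int × Int × Int)) (i j : Nat) (hj : j < boxes.length)
    (hd : pvD boxes i < pvD boxes j) : pvMu boxes j < pvMu boxes i := by
  have hmem : boxes.getD j (0,0,0) ∈ boxes := by
    rw [List.getD_eq_getElem boxes _ hj]; exact boxes.getElem_mem hj
  refine pvCountP_lt _ _ _ ?_ (boxes.getD j (0,0,0)) hmem ?_ ?_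
  · intro x hx hpx
    simp only [decide_eq_true_eq] at hpx ⊢
    exact lt_trans hd hpx
  · exact decide_eq_true hd
  · simp [pvD]

theorem pvMu_le (boxes : List (Int × Int × Int)) (i : Nat) : pvMu boxes i ≤ boxes.length :=
  List.countP_le_length

theorem pvPure_irrel (boxes : List (Int × Int × Int)) (myStack : List Int) :
    ∀ f g i, pvMu boxes i < f → pvMu boxes i < g →
      pvPure boxes myStack f i = pvPure boxes myStack g i := by
  intro f
  induction f with
  | zero => intro g i h; omega
  | succ f ih =>
    intro g i hf hg
    match g, hg with
    | g + 1, hg =>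
      show pvPure boxes myStack (f+1) i = pvPure boxes myStack (g+1) i
      simp only [pvPure]
      congr 1
      congr 1
      apply List.foldl_ext
      intro acc j hj
      split_ifs with hc
      · congr 1
        have hjlt : pvMu boxes j < pvMu boxes i := by
          apply pvMu_lt _ _ _ (List.mem_range.mp hj)
          simp [pvD]; exact hc.1
        exact ih g j (by omega) (by omega)
      · rfl

theorem pvVal_eq (boxes : List (Int × Int × Int)) (myStack : List Int) (i : Nat) :
    pvVal boxes myStack i =
      (if myStack.getD i 0 ≠ -1 then myStack.getD i 0
      else
        (boxes.getD i (0,0,0)).2.1 + (List.range boxes.length).foldl (fun best j =>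
          let u := boxes.getD j (0, 0, 0)
          if u.2.2 > (boxes.getD i (0,0,0)).2.2 ∧ u.1 > (boxes.getD i (0,0,0)).1 ∧ u.2.1 > (boxes.getD i (0,0,0)).2.1 then
            max best (pvVal boxes myStack j)
          else best) 0) := by
  show pvPure boxes myStack (pvMu boxes i + 1) i = _
  simp only [pvPure]
  congr 1
  congr 1
  apply List.foldl_ext
  intro acc j hj
  split_ifs with hc
  · congr 1
    have hjlt : pvMu boxes j < pvMu boxes i := by
      apply pvMu_lt _ _ _ (List.mem_range.mp hj)
      simp [pvD]; exact hc.1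
    exact pvPure_irrel boxes myStack _ _ j (by omega) (by omega)
  · rfl

theorem pvN_nonneg (len : Nat) (ix : Int) (h : 0 ≤ ix) : pvN len ix = ix.toNat := by
  unfold pvN; split_ifs <;> omega

theorem pvGetD_set (xs : List Int) (a k : Nat) (v : Int) (hk : k < xs.length) :
    (xs.set a v).getD k 0 = if k = a then v else xs.getD k 0 := by
  split_ifs with h
  · subst h; rw [List.getD_eq_getElem _ _ (by simpa using hk)]
    simp
  · rw [List.getD_eq_getElem _ _ (by simpa using hk), List.getD_eq_getElem _ _ hk]
    simp [List.getElem_set]; intro h'; omega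

-- B's per-index body
def pvBodyB (boxes : List (Int × Int × Int)) (myStack : List Int) (dp : List Int) (i : Int) : List Int :=
  if PySem.List.pyGetD myStack i 0 ≠ -1 then
    PySem.List.pySetD dp i (PySem.List.pyGetD myStack i 0)
  else
    let t := PySem.List.pyGetD boxes i (0, 0, 0)
    let best := (PySem.List.pyRange 0 boxes.length 1).foldl (fun best j =>
      let u := PySem.List.pyGetD boxes j (0, 0, 0)
      if u.2.2 > t.2.2 ∧ u.1 > t.1 ∧ u.2.1 > t.2.1 then
        max best (PySem.List.pyGetD dp j 0)
      else best) 0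
    PySem.List.pySetD dp i (t.2.1 + best)

theorem pvDpLoop (boxes : List (Int × Int × Int)) (myStack : List Int)
    (hle : boxes.length ≤ myStack.length) :
    ∀ (rem : List Int) (dp : List Int),
      (∀ a ∈ rem, 0 ≤ a ∧ a < (boxes.length : Int)) →
      rem.Pairwise (fun a b =>
        (PySem.List.pyGetD boxes b (0,0,0)).2.2 ≤ (PySem.List.pyGetD boxes a (0,0,0)).2.2) →
      dp.length = boxes.length →
      (∀ k : Nat, k < boxes.length → ((k : Int) ∉ rem) → dp.getD k 0 = pvVal boxes myStack k) →
      (rem.foldl (pvBodyB boxes myStack) dp).length = boxes.length ∧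
      (∀ k : Nat, k < boxes.length →
        (rem.foldl (pvBodyB boxes myStack) dp).getD k 0 = pvVal boxes myStack k) := by
  intro rem
  induction rem with
  | nil =>
    intro dp _ _ hlen hdp
    exact ⟨hlen, fun k hk => hdp k hk (by simp)⟩
  | cons i rest ih =>
    intro dp hmem hpw hlen hdp
    obtain ⟨hi0, hin⟩ := hmem i (.head _)
    have hiN : pvN boxes.length i = i.toNat := pvN_nonneg _ _ hi0
    have hitn : i.toNat < boxes.length := by omega
    -- the value written at slot i is pvVal i.toNat
    have hval : pvBodyB boxes myStack dp i = dp.set i.toNat (pvVal boxes myStack i.toNat) := by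
      have hms_get : PySem.List.pyGetD myStack i 0 = myStack.getD i.toNat 0 := by
        rw [pyGetD_pvN _ _ _ (by omega) (by omega), pvN_nonneg _ _ hi0]
      unfold pvBodyB
      split_ifs with hg
      · rw [hms_get] at hg
        rw [pySetD_pvN _ _ _ (by omega) (by omega), hlen, hiN, hms_get]
        congr 1
        rw [pvVal_eq, if_pos hg]
      · rw [hms_get] at hg
        rw [not_not] at hg
        rw [pySetD_pvN _ _ _ (by omega) (by omega), hlen, hiN]
        congr 1
        have hbx : PySem.List.pyGetD boxes i (0,0,0) = boxes.getD i.toNat (0,0,0) := by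
          rw [pyGetD_pvN _ _ _ (by omega) (by omega), hiN]
        rw [pvVal_eq, if_neg (by simpa [List.getD] using hg), hbx]
        congr 1
        rw [PySem.List.pyRange_one, List.foldl_map]
        apply List.foldl_ext
        intro acc j hj
        have hjn : j < boxes.length := List.mem_range.mp hj
        have hbxj : PySem.List.pyGetD boxes ((0:Int) + j) (0,0,0) = boxes.getD j (0,0,0) := by
          rw [pyGetD_pvN _ _ _ (by omega) (by simpa using hjn), pvN_nonneg _ _ (by omega)]
          congr 1; omega
        rw [hbxj]
        dsimp only
        split_ifs with hc
        · congr 1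
          -- dp[j] is already the final value: j is strictly deeper, hence not in i :: rest
          have hDj : pvD boxes i.toNat < pvD boxes j := by
            simpa [pvD, hbx] using hc.1
          have hjnot : (j : Int) ∉ (i :: rest) := by
            intro hmem'
            cases hmem' with
            | head => simp at hDj
            | tail _ hmem' =>
              have := (List.pairwise_cons.mp hpw).1 _ hmem'
              rw [pyGetD_pvN _ _ _ (by omega) (by simpa using hjn), pvN_nonneg _ _ (by omega),
                pyGetD_pvN _ _ _ (by omega) (by omega), hiN] at this
              simp only [Int.toNat_natCast] at this
              exact absurd hDj (not_lt.mpr this)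
          have := hdp j hjn hjnot
          rw [pyGetD_pvN _ _ _ (by omega) (by rw [hlen]; simpa using hjn),
            pvN_nonneg _ _ (by omega)]
          simpa using this
        · rfl
    constructor
    · have := ih (pvBodyB boxes myStack dp i)
        (fun a ha => hmem a (.tail _ ha)) (List.pairwise_cons.mp hpw).2
        (by rw [hval]; simpa using hlen)
        ?_ |>.1
      · simpa using this
      · intro k hk hknot
        rw [hval, pvGetD_set _ _ _ _ (by omega)]
        split_ifs with hki
        · rw [hki]
        · exact hdp k hk (by
            intro hm; cases hm with
            | head => exact hki (by omega)
            | tail _ hm => exact hknot hm)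
    · have := ih (pvBodyB boxes myStack dp i)
        (fun a ha => hmem a (.tail _ ha)) (List.pairwise_cons.mp hpw).2
        (by rw [hval]; simpa using hlen)
        ?_ |>.2
      · simpa using this
      · intro k hk hknot
        rw [hval, pvGetD_set _ _ _ _ (by omega)]
        split_ifs with hki
        · rw [hki]
        · exact hdp k hk (by
            intro hm; cases hm with
            | head => exact hki (by omega)
            | tail _ hm => exact hknot hm)

theorem pvAlt_eq (box : Int) (boxes : List (Int × Int × Int)) (myStack : List Int)
    (hle : boxes.length ≤ myStack.length)
    (hb1 : -(boxes.length : Int) ≤ box) (hb2 : box < boxes.length) :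
    findStack_helper_alt box boxes myStack = pvVal boxes myStack (pvN boxes.length box) := by
  show PySem.List.pyGetD
      (List.foldl (pvBodyB boxes myStack) (List.replicate boxes.length 0)
        (PySem.List.sorted (PySem.List.pyRange 0 (boxes.length:Int) 1)
          (fun i => (PySem.List.pyGetD boxes i (0,0,0)).2.2) true)) box 0 = _
  have horder := pvDpLoop boxes myStack hle
    (PySem.List.sorted (PySem.List.pyRange 0 (boxes.length:Int) 1)
      (fun i => (PySem.List.pyGetD boxes i (0,0,0)).2.2) true)
    (List.replicate boxes.length 0)
    (by
      intro a ha
      rw [PySem.List.mem_sorted] at ha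
      exact PySem.List.mem_pyRange_one.mp ha)
    (PySem.List.sorted_pairwise_rev _ _)
    (by simp)
    (by
      intro k hk hknot
      exfalso; apply hknot
      rw [PySem.List.mem_sorted, PySem.List.mem_pyRange_one]
      constructor <;> omega)
  rw [pyGetD_pvN _ _ _ (by rw [horder.1]; exact_mod_cast hb1) (by rw [horder.1]; exact_mod_cast hb2)]
  rw [horder.1]
  exact horder.2 (pvN boxes.length box) (pvN_lt _ _ hb1 hb2)

-- the loop body of A, named
def pvBodyA (boxes : List (Int × Int × Int)) (fuel : Nat) (ix : Int) (t : Int × Int × Int)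
    (s : List Int) (b : Int) : List Int :=
  let u := PySem.List.pyGetD boxes b (0, 0, 0)
  if u.2.2 > t.2.2 ∧ u.1 > t.1 ∧ u.2.1 > t.2.1 then
    let cur := PySem.List.pyGetD s ix 0
    let r := findAuxA fuel b boxes s
    PySem.List.pySetD r.2 ix (max cur (r.1 + t.2.1))
  else s

theorem findAuxA_succ (f : Nat) (ix : Int) (boxes : List (Int × Int × Int)) (st : List Int) :
    findAuxA (f+1) ix boxes st =
      (if PySem.List.pyGetD st ix 0 ≠ -1 then (PySem.List.pyGetD st ix 0, st) else
        (PySem.List.pyGetD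
            ((PySem.List.pyRange 0 boxes.length 1).foldl
              (pvBodyA boxes f ix (PySem.List.pyGetD boxes ix (0,0,0)))
              (PySem.List.pySetD st ix (PySem.List.pyGetD boxes ix (0,0,0)).2.1)) ix 0,
          (PySem.List.pyRange 0 boxes.length 1).foldl
              (pvBodyA boxes f ix (PySem.List.pyGetD boxes ix (0,0,0)))
              (PySem.List.pySetD st ix (PySem.List.pyGetD boxes ix (0,0,0)).2.1))) := rfl

theorem pvBodyA_eq (boxes : List (Int × Int × Int)) (f : Nat) (ix : Int) (t : Int × Int × Int)
    (s : List Int) (b : Int) :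
    pvBodyA boxes f ix t s b =
      if (PySem.List.pyGetD boxes b (0,0,0)).2.2 > t.2.2 ∧
          (PySem.List.pyGetD boxes b (0,0,0)).1 > t.1 ∧
          (PySem.List.pyGetD boxes b (0,0,0)).2.1 > t.2.1 then
        PySem.List.pySetD (findAuxA f b boxes s).2 ix
          (max (PySem.List.pyGetD s ix 0) ((findAuxA f b boxes s).1 + t.2.1))
      else s := rfl

theorem pvAux_spec (boxes : List (Int × Int × Int)) (myStack : List Int) :
    ∀ (fuel : Nat) (ix : Int) (st : List Int),
      -(boxes.length : Int) ≤ ix → ix < boxes.length → boxes.length ≤ st.length →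
      pvN st.length ix = pvN boxes.length ix →
      (st.getD (pvN boxes.length ix) 0 = myStack.getD (pvN boxes.length ix) 0 ∨
        st.getD (pvN boxes.length ix) 0 = pvVal boxes myStack (pvN boxes.length ix)) →
      (∀ k : Nat, k < boxes.length → pvD boxes (pvN boxes.length ix) < pvD boxes k →
        st.getD k 0 = myStack.getD k 0 ∨ st.getD k 0 = pvVal boxes myStack k) →
      pvMu boxes (pvN boxes.length ix) < fuel →
      (findAuxA fuel ix boxes st).1 = pvVal boxes myStack (pvN boxes.length ix) ∧
      (findAuxA fuel ix boxes st).2.length = st.length ∧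
      (∀ k : Nat, k < boxes.length →
        (findAuxA fuel ix boxes st).2.getD k 0 = st.getD k 0 ∨
        (findAuxA fuel ix boxes st).2.getD k 0 = pvVal boxes myStack k) ∧
      (∀ k : Nat, k < boxes.length → ¬ pvD boxes (pvN boxes.length ix) < pvD boxes k →
        k ≠ pvN boxes.length ix →
        (findAuxA fuel ix boxes st).2.getD k 0 = st.getD k 0) := by
  intro fuel
  induction fuel with
  | zero => intro ix st _ _ _ _ _ _ hmu; omega
  | succ f ih =>
    intro ix st hx1 hx2 hlen hixN hslot hregion hmu
    set n := boxes.length with hn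
    set i := pvN n ix with hi
    have hilt : i < n := pvN_lt _ _ hx1 hx2
    have hget_st : PySem.List.pyGetD st ix 0 = st.getD i 0 := by
      rw [pyGetD_pvN _ _ _ (by omega) (by omega), hixN]
    have hget_bx : PySem.List.pyGetD boxes ix (0,0,0) = boxes.getD i (0,0,0) := by
      rw [pyGetD_pvN _ _ _ (by omega) (by omega)]
    rw [findAuxA_succ]
    split_ifs with hguard
    · -- memo hit
      rw [hget_st] at hguard
      refine ⟨?_, rfl, fun k hk => Or.inl rfl, fun k hk _ _ => rfl⟩
      show PySem.List.pyGetD st ix 0 = _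
      rw [hget_st]
      rcases hslot with h | h
      · rw [h, pvVal_eq, if_pos (by rw [← h]; exact hguard)]
      · exact h
    · -- compute
      rw [hget_st] at hguard
      have hstd : st.getD i 0 = -1 := by omega
      have hmsd : myStack.getD i 0 = -1 := by
        rcases hslot with h | h
        · omega
        · by_contra hne
          have := pvVal_eq boxes myStack i
          rw [if_pos hne] at this
          rw [h, this] at hstd
          exact hne hstd
      rw [hget_bx]
      set t := boxes.getD i (0,0,0) with ht
      have hst1 : PySem.List.pySetD st ix t.2.1 = st.set i t.2.1 := by
        rw [pySetD_pvN _ _ _ (by omega) (by omega), hixN]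
      rw [hst1]
      -- the loop invariant
      have loop : ∀ (l : List Int) (s : List Int) (acc : Int),
          (∀ b ∈ l, 0 ≤ b ∧ b < (n : Int)) →
          s.length = st.length →
          s.getD i 0 = t.2.1 + acc →
          (∀ k : Nat, k < n → pvD boxes i < pvD boxes k →
            s.getD k 0 = myStack.getD k 0 ∨ s.getD k 0 = pvVal boxes myStack k) →
          (∀ k : Nat, k < n → k ≠ i → ¬ pvD boxes i < pvD boxes k → s.getD k 0 = st.getD k 0) →
          (∀ k : Nat, k < n → pvD boxes i < pvD boxes k →
            s.getD k 0 = st.getD k 0 ∨ s.getD k 0 = pvVal boxes myStack k) →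
          (l.foldl (pvBodyA boxes f ix t) s).length = st.length ∧
          (l.foldl (pvBodyA boxes f ix t) s).getD i 0 =
            t.2.1 + l.foldl (fun best b =>
              if (boxes.getD b.toNat (0,0,0)).2.2 > t.2.2 ∧ (boxes.getD b.toNat (0,0,0)).1 > t.1 ∧
                  (boxes.getD b.toNat (0,0,0)).2.1 > t.2.1 then
                max best (pvVal boxes myStack b.toNat)
              else best) acc ∧
          (∀ k : Nat, k < n → k ≠ i → ¬ pvD boxes i < pvD boxes k →
            (l.foldl (pvBodyA boxes f ix t) s).getD k 0 = st.getD k 0) ∧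
          (∀ k : Nat, k < n → pvD boxes i < pvD boxes k →
            (l.foldl (pvBodyA boxes f ix t) s).getD k 0 = st.getD k 0 ∨
            (l.foldl (pvBodyA boxes f ix t) s).getD k 0 = pvVal boxes myStack k) := by
        intro l
        induction l with
        | nil => intro s acc _ h1 h2 _ h4 h5; exact ⟨h1, h2, h4, h5⟩
        | cons b lr ihl =>
          intro s acc hbs hsl hsi hgood hfix hrel
          obtain ⟨hb0, hbn⟩ := hbs b (.head _)
          have hbN : pvN n b = b.toNat := pvN_nonneg _ _ hb0
          have hbtn : b.toNat < n := by omega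
          have hbxb : PySem.List.pyGetD boxes b (0,0,0) = boxes.getD b.toNat (0,0,0) := by
            rw [pyGetD_pvN _ _ _ (by omega) (by exact_mod_cast hbn), hbN]
          simp only [List.foldl_cons]
          rw [pvBodyA_eq, hbxb]
          split_ifs with hc
          · -- valid successor: recursive call resolves it
            have hDb : pvD boxes i < pvD boxes b.toNat := by
              simp only [pvD]; rw [← ht]; exact hc.1
            have hcur : PySem.List.pyGetD s ix 0 = t.2.1 + acc := by
              rw [pyGetD_pvN _ _ _ (by omega) (by omega), hsl, hixN]
              exact hsi
            have hrec := ih b s (by omega) (by exact_mod_cast hbn) (by omega)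
              (by rw [pvN_nonneg _ _ hb0, pvN_nonneg _ _ hb0])
              (by rw [hbN]; exact hgood b.toNat hbtn hDb)
              (by intro k hk hdk; rw [hbN] at hdk; exact hgood k hk (lt_trans hDb hdk))
              (by rw [hbN]; exact lt_of_lt_of_le (pvMu_lt boxes i b.toNat hbtn hDb) (by omega))
            obtain ⟨hr1, hr2, hr3, hr4⟩ := hrec
            rw [hbN] at hr1 hr4
            have hine : i ≠ b.toNat := fun h => absurd hDb (by rw [h]; exact lt_irrefl _)
            have hset : PySem.List.pySetD (findAuxA f b boxes s).2 ix
                (max (PySem.List.pyGetD s ix 0) ((findAuxA f b boxes s).1 + t.2.1)) =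
                (findAuxA f b boxes s).2.set i (t.2.1 + max acc (pvVal boxes myStack b.toNat)) := by
              rw [pySetD_pvN _ _ _ (by omega) (by omega), hr2, hsl, hixN]
              congr 1
              rw [hcur, hr1, add_comm (pvVal boxes myStack b.toNat) t.2.1]
              exact max_add_add_left _ _ _
            rw [hset]
            have hri : (findAuxA f b boxes s).2.getD i 0 = s.getD i 0 :=
              hr4 i hilt (not_lt.mpr (le_of_lt hDb)) hine
            apply ihl
            · intro a ha; exact hbs a (.tail _ ha)
            · rw [List.length_set, hr2, hsl]
            · rw [pvGetD_set _ _ _ _ (by rw [hr2]; omega)]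
              simp
            · intro k hk hdk
              rw [pvGetD_set _ _ _ _ (by rw [hr2]; omega)]
              split_ifs with hki
              · exact absurd hdk (by rw [hki]; exact lt_irrefl _)
              · rcases hr3 k hk with h' | h'
                · rw [h']; exact hgood k hk hdk
                · rw [h']; right; rfl
            · intro k hk hki hdk
              rw [pvGetD_set _ _ _ _ (by rw [hr2]; omega)]
              rw [if_neg hki]
              have hknb : k ≠ b.toNat := fun h => hdk (by rw [h]; exact hDb)
              rw [hr4 k hk (fun h' => hdk (lt_trans hDb h')) hknb]
              exact hfix k hk hki hdk
            · intro k hk hdk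
              have hki : k ≠ i := fun h => absurd hdk (by rw [h]; exact lt_irrefl _)
              rw [pvGetD_set _ _ _ _ (by rw [hr2]; omega), if_neg hki]
              rcases hr3 k hk with h' | h'
              · rw [h']; exact hrel k hk hdk
              · rw [h']; right; rfl
          · -- not a valid successor
            exact ihl s acc (fun a ha => hbs a (.tail _ ha)) hsl hsi hgood hfix hrel
      obtain ⟨hl1, hl2, hl3, hl4⟩ := loop (PySem.List.pyRange 0 n 1) (st.set i t.2.1) 0
        (fun a ha => PySem.List.mem_pyRange_one.mp ha)
        (by simp)
        (by rw [pvGetD_set _ _ _ _ (by omega), if_pos rfl]; ring)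
        (by
          intro k hk hdk
          have hki : k ≠ i := fun h => absurd hdk (by rw [h]; exact lt_irrefl _)
          rw [pvGetD_set _ _ _ _ (by omega), if_neg hki]
          exact hregion k hk hdk)
        (by
          intro k hk hki _
          rw [pvGetD_set _ _ _ _ (by omega), if_neg hki])
        (by
          intro k hk hdk
          have hki : k ≠ i := fun h => absurd hdk (by rw [h]; exact lt_irrefl _)
          rw [pvGetD_set _ _ _ _ (by omega), if_neg hki]
          left; rfl)
      have hval : (((PySem.List.pyRange 0 (n:Int) 1).foldl (pvBodyA boxes f ix t)
          (st.set i t.2.1))).getD i 0 = pvVal boxes myStack i := by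
        rw [hl2, pvVal_eq, if_neg (by simpa [List.getD] using hmsd), ← ht]
        congr 1
        rw [PySem.List.pyRange_one, List.foldl_map]
        apply List.foldl_ext
        intro acc j hj
        have h0j : (0:Int) + (j:Int) = (j:Int) := by omega
        rw [h0j]
        simp only [Int.toNat_natCast]
      refine ⟨?_, hl1, ?_, ?_⟩
      · show PySem.List.pyGetD _ ix 0 = _
        rw [pyGetD_pvN _ _ _ (by rw [hl1]; omega) (by rw [hl1]; omega), hl1, hixN]
        exact hval
      · intro k hk
        by_cases hki : k = i
        · right; rw [hki]; exact hval
        · by_cases hdk : pvD boxes i < pvD boxes k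
          · exact hl4 k hk hdk
          · left; exact hl3 k hk hki hdk
      · intro k hk hdk hki
        exact hl3 k hk hki hdk

-- ===== VERDICT (by name: the statement is the Claim_ definition above) =====
theorem findStack_helper_spec : Claim_equal_findStack_helper := by
  intro box boxes myStack _ hpre
  obtain ⟨hle, hcase⟩ := hpre
  unfold Spec_findStack_helper findStack_helper
  have hb1 : -(boxes.length : Int) ≤ box := by rcases hcase with ⟨h0, _⟩ | ⟨_, h1, _⟩ <;> omega
  have hb2 : box < boxes.length := by rcases hcase with ⟨_, h0⟩ | ⟨heq, _, h1⟩ <;> omega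
  have hixN : pvN myStack.length box = pvN boxes.length box := by
    rcases hcase with ⟨h0, _⟩ | ⟨heq, _⟩
    · rw [pvN_nonneg _ _ h0, pvN_nonneg _ _ h0]
    · rw [heq]
  have ha := pvAux_spec boxes myStack (boxes.length + 1) box myStack hb1 hb2 hle hixN
    (Or.inl rfl) (fun k _ _ => Or.inl rfl)
    (by have := pvMu_le boxes (pvN boxes.length box); omega)
  rw [pvAlt_eq box boxes myStack hle hb1 hb2]
  exact ha.1
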